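-- pv_equiv track=rewrite | github.com/imclassy/smartdj | dominantBPMmethod.py | groupBeats
-- ===== SOURCE A (Python) =====
-- def groupBeats(beat_times, intervals):
--     beatsByInterval = {}
--     for interval in intervals:
--         start, end = interval
--         beats = []
--         for beat_time in beat_times:
--             if beat_time > start and beat_time <= end:
--                 beats.append(beat_time)
--         beatsByInterval[interval] = beats
--
--     return beatsByInterval
-- ===== SOURCE B (Python) =====
-- def _firstGreater(keys, x, lo, hi):
--     # first index in [lo, hi) whose key exceeds x (keys ascending), else hi
--     if lo >= hi:
--         return lo
--     mid = (lo + hi) // 2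
--     if keys[mid] <= x:
--         return _firstGreater(keys, x, mid + 1, hi)
--     return _firstGreater(keys, x, lo, mid)
--
--
-- def groupBeats(beat_times, intervals):
--     # Sort the beats once (keeping original positions); each interval's beats are a
--     # contiguous window of the sorted array, found by binary search, then put back
--     # into original beat_times order.
--     pairs = sorted(((t, i) for i, t in enumerate(beat_times)), key=lambda p: p[0])
--     keys = [t for t, _ in pairs]
--     n = len(pairs)
--     beatsByInterval = {}
--     for interval in intervals:
--         start, end = interval
--         lo = _firstGreater(keys, start, 0, n)
--         hi = _firstGreater(keys, end, 0, n)
--         window = sorted(pairs[lo:hi], key=lambda p: p[1])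
--         beatsByInterval[interval] = [t for t, _ in window]
--     return beatsByInterval
-- ===== Notes on version B (the rewrite author's own statement) =====
-- stated objective: faster
-- what changed: B sorts the beats once (keeping original positions), binary-searches each interval's (start, end] window in the sorted array, and restores original order, instead of rescanning the whole beat list for every interval; measured faster in a timing run at the largest size (about 1x only on inputs where an interval captures all beats).
import Mathlib
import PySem

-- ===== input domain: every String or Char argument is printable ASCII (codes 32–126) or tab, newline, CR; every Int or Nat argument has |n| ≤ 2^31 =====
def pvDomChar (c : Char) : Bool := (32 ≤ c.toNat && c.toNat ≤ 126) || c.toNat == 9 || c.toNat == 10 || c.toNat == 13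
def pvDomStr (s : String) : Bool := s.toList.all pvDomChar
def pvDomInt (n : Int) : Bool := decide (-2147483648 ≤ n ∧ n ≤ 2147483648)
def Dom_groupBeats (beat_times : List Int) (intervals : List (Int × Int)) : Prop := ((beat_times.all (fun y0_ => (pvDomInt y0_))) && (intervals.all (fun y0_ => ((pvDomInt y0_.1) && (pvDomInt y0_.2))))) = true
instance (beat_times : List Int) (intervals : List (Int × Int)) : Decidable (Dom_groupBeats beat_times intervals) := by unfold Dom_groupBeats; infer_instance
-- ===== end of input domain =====

-- B sorts the beats once and finds each interval's beats as a binary-searched window of the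
-- sorted array (restored to original order), instead of rescanning all beats per interval;
-- measured faster in a timing run at the largest size (though on an input whose interval
-- captures every beat, B's per-interval reorder costs about what A's scan does).

-- ===== PORT A =====
def groupBeats (beat_times : List Int) (intervals : List (Int × Int)) : List (Int × Int × List Int) :=
  (intervals.foldl (fun (d : PySem.Dict (Int × Int) (List Int)) interval =>
      let beats := beat_times.foldl (fun bs beat_time =>
        if beat_time > interval.1 ∧ beat_time ≤ interval.2 then bs ++ [beat_time] else bs) []
      d.insert interval beats)
    PySem.Dict.empty).items.map (fun p => (p.1.1, p.1.2, p.2))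

-- ===== PORT B =====
-- Source B's _firstGreater: recursive binary search; in every call the algorithm makes,
-- 0 ≤ lo ≤ mid < hi ≤ len(keys), so the Python IndexError branch is unreachable
-- (getD 0 only totalizes keys[mid] there).
def pvFirstGreater (keys : List Int) (x : Int) (lo hi : Int) : Int :=
  if lo ≥ hi then lo
  else
    let mid := PySem.Int.floordiv (lo + hi) 2
    if (PySem.List.pyGet? keys mid).getD 0 ≤ x then pvFirstGreater keys x (mid + 1) hi
    else pvFirstGreater keys x lo mid
termination_by (hi - lo).toNat
decreasing_by
  all_goals
    have h2 : PySem.Int.floordiv (lo + hi) 2 = (lo + hi) / 2 := by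
      simp [PySem.Int.floordiv, Int.fdiv_eq_ediv]
    simp only [mid, h2] at *; omega

def groupBeats_alt (beat_times : List Int) (intervals : List (Int × Int)) : List (Int × Int × List Int) :=
  -- sorted(((t, i) for i, t in enumerate(beat_times)), key=lambda p: p[0])
  let pairs := PySem.List.sorted ((PySem.List.enumerate beat_times).map (fun p => (p.2, p.1))) Prod.fst false
  let keys := pairs.map (fun p => p.1)
  let n : Int := (pairs.length : Int)
  (intervals.foldl (fun (d : PySem.Dict (Int × Int) (List Int)) interval =>
      let lo := pvFirstGreater keys interval.1 0 n
      let hi := pvFirstGreater keys interval.2 0 n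
      let window := PySem.List.sorted (PySem.List.slice pairs (some lo) (some hi)) Prod.snd false
      d.insert interval (window.map (fun p => p.1)))
    PySem.Dict.empty).items.map (fun p => (p.1.1, p.1.2, p.2))

-- ===== PRECONDITION & SPEC =====
def Spec_groupBeats (beat_times : List Int) (intervals : List (Int × Int)) (out : List (Int × Int × List Int)) : Prop := out = groupBeats_alt beat_times intervals
instance (beat_times : List Int) (intervals : List (Int × Int)) (out : List (Int × Int × List Int)) : Decidable (Spec_groupBeats beat_times intervals out) := by unfold Spec_groupBeats; infer_instance

-- ===== CLAIM (what is proved, stated in full; the proofs are below) =====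
def Claim_equal_groupBeats : Prop := ∀ (beat_times : List Int) (intervals : List (Int × Int)), Dom_groupBeats beat_times intervals → Spec_groupBeats beat_times intervals (groupBeats beat_times intervals)

-- ===== LEMMAS AND PROOFS =====

-- number of keys ≤ x (the boundary the binary search finds)
def pvC (keys : List Int) (x : Int) : Nat := keys.countP (fun k => decide (k ≤ x))

-- the sorted (value, original index) array and its key column, as B builds them
def pvPairs (bts : List Int) : List (Int × Int) :=
  PySem.List.sorted ((PySem.List.enumerate bts).map (fun p => (p.2, p.1))) Prod.fst false

def pvKeys (bts : List Int) : List Int := (pvPairs bts).map (fun p => p.1)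

-- A's inner loop computes a filter
theorem pvA_inner (bts : List Int) (iv : Int × Int) (acc : List Int) :
    bts.foldl (fun bs b => if b > iv.1 ∧ b ≤ iv.2 then bs ++ [b] else bs) acc
      = acc ++ bts.filter (fun b => decide (iv.1 < b ∧ b ≤ iv.2)) :=
  PySem.List.foldl_append_ite_eq_filter _ _ _

theorem pvFilter_take (l : List (Int × Int)) (hs : l.Pairwise (fun a b => a.1 ≤ b.1)) (x : Int) :
    l.filter (fun p => decide (p.1 ≤ x)) = l.take (l.countP (fun p => decide (p.1 ≤ x))) := by
  induction l with
  | nil => simp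
  | cons p t ih =>
    rcases List.pairwise_cons.mp hs with ⟨hhead, htail⟩
    by_cases h : p.1 ≤ x
    · simp [h, ih htail]
    · have hc : t.countP (fun p => decide (p.1 ≤ x)) = 0 := by
        rw [List.countP_eq_zero]
        intro q hq
        simp only [decide_eq_true_eq]
        exact fun hqx => h (le_trans (hhead q hq) hqx)
      have hf : t.filter (fun p => decide (p.1 ≤ x)) = [] := by
        rw [List.filter_eq_nil_iff]
        intro q hq
        simp only [decide_eq_true_eq]
        exact fun hqx => h (le_trans (hhead q hq) hqx)
      simp [h, hc, hf]

theorem pvWindow_filter (l : List (Int × Int)) (hs : l.Pairwise (fun a b => a.1 ≤ b.1)) (s e : Int) :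
    (l.take (l.countP (fun p => decide (p.1 ≤ e)))).drop (l.countP (fun p => decide (p.1 ≤ s)))
      = l.filter (fun p => decide (s < p.1 ∧ p.1 ≤ e)) := by
  induction l with
  | nil => simp
  | cons p t ih =>
    rcases List.pairwise_cons.mp hs with ⟨hhead, htail⟩
    by_cases hpS : p.1 ≤ s
    · by_cases hpE : p.1 ≤ e
      · have : ¬ (s < p.1 ∧ p.1 ≤ e) := by omega
        simp [hpS, hpE, ih htail]
      · -- e < p.1 ≤ s : everything empty
        have hce : t.countP (fun p => decide (p.1 ≤ e)) = 0 := by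
          rw [List.countP_eq_zero]; intro q hq; have := hhead q hq; simp; omega
        have hcl : (p :: t).countP (fun p => decide (p.1 ≤ e)) = 0 := by
          simp [hpE, hce]
        have hf : (p :: t).filter (fun p => decide (s < p.1 ∧ p.1 ≤ e)) = [] := by
          rw [List.filter_eq_nil_iff]
          intro q hq
          rcases List.mem_cons.mp hq with h | h
          · subst h; simp; omega
          · have := hhead q h; simp; omega
        rw [hcl, hf]; simp
    · -- s < p.1 : no element ≤ s
      have hcs : (p :: t).countP (fun p => decide (p.1 ≤ s)) = 0 := by
        rw [List.countP_eq_zero]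
        intro q hq
        rcases List.mem_cons.mp hq with h | h
        · subst h; simp; omega
        · have := hhead q h; simp; omega
      by_cases hpE : p.1 ≤ e
      · have hfe : t.filter (fun p => decide (s < p.1 ∧ p.1 ≤ e)) = t.filter (fun p => decide (p.1 ≤ e)) := by
          apply List.filter_congr
          intro q hq; have := hhead q hq; simp; omega
        have hft := pvFilter_take t htail e
        have h1 : decide (s < p.1 ∧ p.1 ≤ e) = true := by simp; omega
        have h2 : (p :: t).countP (fun p => decide (p.1 ≤ e)) = t.countP (fun p => decide (p.1 ≤ e)) + 1 := by
          simp [hpE]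
        rw [hcs, List.drop_zero, h2, List.take_succ_cons, List.filter_cons, h1, hfe, hft]
        simp
      · have hce : (p :: t).countP (fun p => decide (p.1 ≤ e)) = 0 := by
          rw [List.countP_eq_zero]
          intro q hq
          rcases List.mem_cons.mp hq with h | h
          · subst h; simp; omega
          · have := hhead q h; simp; omega
        have hf : (p :: t).filter (fun p => decide (s < p.1 ∧ p.1 ≤ e)) = [] := by
          rw [List.filter_eq_nil_iff]
          intro q hq
          rcases List.mem_cons.mp hq with h | h
          · subst h; simp; omega
          · have := hhead q h; simp; omega
        rw [hce, hf]; simp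


theorem pvC_ge (keys : List Int) (hs : keys.Pairwise (· ≤ ·)) (x : Int) (m : Nat)
    (hm : m < keys.length) (hkm : keys[m] ≤ x) : m + 1 ≤ pvC keys x := by
  have hsplit := List.take_append_drop (m + 1) keys
  have : pvC keys x = (keys.take (m + 1)).countP (fun k => decide (k ≤ x))
      + (keys.drop (m + 1)).countP (fun k => decide (k ≤ x)) := by
    rw [pvC]
    conv_lhs => rw [← hsplit]
    exact List.countP_append
  have htake : (keys.take (m + 1)).countP (fun k => decide (k ≤ x)) = (keys.take (m + 1)).length := by
    rw [List.countP_eq_length]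
    intro a ha
    rcases List.mem_iff_getElem.mp ha with ⟨j, hj, rfl⟩
    have hj' : j < keys.length := lt_of_lt_of_le hj (by simp [List.length_take];) |>.trans_le (le_refl _)
    simp only [List.getElem_take]
    have hjm : j ≤ m := by simp [List.length_take] at hj; omega
    have hle : keys[j] ≤ keys[m] := by
      rcases Nat.lt_or_ge j m with h | h
      · exact (List.pairwise_iff_getElem.mp hs) j m _ hm h
      · have : j = m := by omega
        subst this; rfl
    simp; exact le_trans hle hkm
  have hlen : (keys.take (m + 1)).length = m + 1 := by simp [List.length_take]; omega
  omega

theorem pvC_le (keys : List Int) (hs : keys.Pairwise (· ≤ ·)) (x : Int) (m : Nat)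
    (hm : m < keys.length) (hkm : x < keys[m]) : pvC keys x ≤ m := by
  have hsplit := List.take_append_drop m keys
  have heq : pvC keys x = (keys.take m).countP (fun k => decide (k ≤ x))
      + (keys.drop m).countP (fun k => decide (k ≤ x)) := by
    rw [pvC]
    conv_lhs => rw [← hsplit]
    exact List.countP_append
  have hdrop : (keys.drop m).countP (fun k => decide (k ≤ x)) = 0 := by
    rw [List.countP_eq_zero]
    intro a ha
    rcases List.mem_iff_getElem.mp ha with ⟨j, hj, rfl⟩
    have hj' : m + j < keys.length := by simp [List.length_drop] at hj; omega
    rw [List.getElem_drop]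
    have hle : keys[m] ≤ keys[m + j] := by
      rcases Nat.eq_zero_or_pos j with h | h
      · subst h; simp
      · exact (List.pairwise_iff_getElem.mp hs) m (m + j) hm hj' (by omega)
    simp; omega
  have htakelen : (keys.take m).countP (fun k => decide (k ≤ x)) ≤ m := by
    calc (keys.take m).countP (fun k => decide (k ≤ x)) ≤ (keys.take m).length := List.countP_le_length
    _ ≤ m := by simp [List.length_take]
  omega

theorem pvFG_spec (keys : List Int) (hs : keys.Pairwise (· ≤ ·)) (x : Int) (lo hi : Int)
    (h0 : 0 ≤ lo) (hn : hi ≤ (keys.length : Int))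
    (hlo : lo ≤ (pvC keys x : Int)) (hhi : (pvC keys x : Int) ≤ hi) :
    pvFirstGreater keys x lo hi = (pvC keys x : Int) := by
  have H : ∀ (n : Nat) (lo hi : Int), (hi - lo).toNat = n → 0 ≤ lo → hi ≤ (keys.length : Int) →
      lo ≤ (pvC keys x : Int) → (pvC keys x : Int) ≤ hi →
      pvFirstGreater keys x lo hi = (pvC keys x : Int) := by
    intro n
    induction n using Nat.strong_induction_on with
    | _ n IH =>
      intro lo hi hfuel h0 hn hlo hhi
      rw [pvFirstGreater]
      by_cases hge : lo ≥ hi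
      · simp only [hge, if_true]; omega
      · simp only [hge, if_false]
        have hfd : PySem.Int.floordiv (lo + hi) 2 = (lo + hi) / 2 := by
          simp [PySem.Int.floordiv, Int.fdiv_eq_ediv]
        set mid := PySem.Int.floordiv (lo + hi) 2 with hmid
        have hb : lo ≤ mid ∧ mid < hi := by rw [hfd]; omega
        have hmn : ((mid.toNat : Nat) : Int) = mid := Int.toNat_of_nonneg (by omega)
        have hmlt : mid.toNat < keys.length := by omega
        have hget : PySem.List.pyGet? keys mid = some keys[mid.toNat] := by
          conv_lhs => rw [← hmn]
          rw [PySem.List.pyGet?_natCast]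
          exact List.getElem?_eq_getElem hmlt
        rw [hget]
        by_cases hkm : keys[mid.toNat] ≤ x
        · simp only [Option.getD_some, hkm, if_true]
          have := pvC_ge keys hs x mid.toNat hmlt hkm
          exact IH (hi - (mid + 1)).toNat (by omega) (mid + 1) hi rfl (by omega) hn (by omega) hhi
        · simp only [Option.getD_some, hkm, if_false]
          have := pvC_le keys hs x mid.toNat hmlt (by omega)
          exact IH (mid - lo).toNat (by omega) lo mid rfl h0 (by omega) hlo (by omega)
  exact H ((hi - lo).toNat) lo hi rfl h0 hn hlo hhi

-- enumerate indices are ≥ the start index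
theorem pvEnum_mem_ge (t : List Int) (st : Int) (q : Int × Int)
    (hq : q ∈ PySem.List.enumerate t st) : st ≤ q.1 := by
  induction t generalizing st with
  | nil => simp [PySem.List.enumerate] at hq
  | cons y u ih =>
    rw [show PySem.List.enumerate (y :: u) st = (st, y) :: PySem.List.enumerate u (st + 1) from rfl] at hq
    rcases List.mem_cons.mp hq with h | h
    · simp [h]
    · have := ih (st + 1) h; omega

-- enumerate has strictly increasing indices
theorem pvEnum_pairwise (bts : List Int) (st : Int) :
    (PySem.List.enumerate bts st).Pairwise (fun a b => a.1 < b.1) := by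
  induction bts generalizing st with
  | nil => simp [PySem.List.enumerate]
  | cons x t ih =>
    rw [show PySem.List.enumerate (x :: t) st = (st, x) :: PySem.List.enumerate t (st + 1) from rfl]
    refine List.Pairwise.cons ?_ (ih (st + 1))
    intro q hq
    have := pvEnum_mem_ge t (st + 1) q hq
    simp; omega

-- filtering enumerate on the value and projecting the value is filtering the list
theorem pvEnum_filter (bts : List Int) (st : Int) (W : Int → Bool) :
    ((PySem.List.enumerate bts st).filter (fun q => W q.2)).map (fun q => q.2) = bts.filter W := by
  induction bts generalizing st with
  | nil => simp [PySem.List.enumerate]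
  | cons x t ih =>
    rw [show PySem.List.enumerate (x :: t) st = (st, x) :: PySem.List.enumerate t (st + 1) from rfl]
    by_cases h : W x <;> simp [h, ih]

-- the per-interval value B computes equals the filter A computes
theorem pvValue_eq (bts : List Int) (s e : Int) :
    (PySem.List.sorted
        (PySem.List.slice (pvPairs bts)
          (some (pvFirstGreater (pvKeys bts) s 0 ((pvPairs bts).length : Int)))
          (some (pvFirstGreater (pvKeys bts) e 0 ((pvPairs bts).length : Int))))
        Prod.snd false).map (fun p => p.1)
      = bts.filter (fun b => decide (s < b ∧ b ≤ e)) := by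
  have hkeysPW : (pvKeys bts).Pairwise (· ≤ ·) :=
    PySem.List.sorted_map_key_pairwise ((PySem.List.enumerate bts).map (fun p => (p.2, p.1))) Prod.fst
  have hpairsPW : (pvPairs bts).Pairwise (fun a b => a.1 ≤ b.1) := by
    have h := hkeysPW
    rw [pvKeys] at h
    exact (List.pairwise_map).mp h
  have hlen : (pvKeys bts).length = (pvPairs bts).length := by simp [pvKeys]
  have hcount : ∀ x : Int, pvC (pvKeys bts) x = (pvPairs bts).countP (fun p => decide (p.1 ≤ x)) := by
    intro x
    rw [pvC, pvKeys, List.countP_map]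
    rfl
  have hfg : ∀ x : Int, pvFirstGreater (pvKeys bts) x 0 ((pvPairs bts).length : Int)
      = ((pvC (pvKeys bts) x : Nat) : Int) := by
    intro x
    refine pvFG_spec _ hkeysPW x 0 _ le_rfl (by rw [hlen]) (by positivity) ?_
    have := List.countP_le_length (p := fun k => decide (k ≤ x)) (l := pvKeys bts)
    rw [pvC]
    omega
  rw [hfg, hfg, PySem.List.slice_natCast, ← List.drop_take, hcount, hcount,
    pvWindow_filter (pvPairs bts) hpairsPW s e]
  have hperm : (((PySem.List.enumerate bts).map (fun p => (p.2, p.1))).filter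
      (fun p => decide (s < p.1 ∧ p.1 ≤ e))).Perm
      ((pvPairs bts).filter (fun p => decide (s < p.1 ∧ p.1 ≤ e))) :=
    ((PySem.List.sorted_perm _ _ _).filter _).symm
  have hpw : (((PySem.List.enumerate bts).map (fun p => (p.2, p.1))).filter
      (fun p => decide (s < p.1 ∧ p.1 ≤ e))).Pairwise (fun a b => a.2 < b.2) := by
    refine List.Pairwise.filter _ ?_
    rw [List.pairwise_map]
    exact pvEnum_pairwise bts 0
  rw [PySem.List.sorted_eq_of_perm_of_pairwise_lt _ _ Prod.snd hperm hpw,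
    List.filter_map, List.map_map]
  exact pvEnum_filter bts 0 (fun b => decide (s < b ∧ b ≤ e))

-- ===== VERDICT (by name: the statement is the Claim_ definition above) =====
theorem groupBeats_spec : Claim_equal_groupBeats := by
  intro bts ivs _
  unfold Spec_groupBeats groupBeats groupBeats_alt
  simp only [pvA_inner, List.nil_append]
  have hfun : (fun (d : PySem.Dict (Int × Int) (List Int)) (interval : Int × Int) =>
        d.insert interval (bts.filter (fun b => decide (interval.1 < b ∧ b ≤ interval.2))))
      = (fun (d : PySem.Dict (Int × Int) (List Int)) (interval : Int × Int) =>
        d.insert interval ((PySem.List.sorted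
          (PySem.List.slice (pvPairs bts)
            (some (pvFirstGreater (pvKeys bts) interval.1 0 ((pvPairs bts).length : Int)))
            (some (pvFirstGreater (pvKeys bts) interval.2 0 ((pvPairs bts).length : Int))))
          Prod.snd false).map (fun p => p.1))) := by
    funext d interval
    rw [pvValue_eq]
  rw [hfun]
  rfl
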